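-- pv_equiv track=rewrite | github.com/anurag12-webster/100_Days_Of_Python_challenge | Day73.py | find_longest_boring_substring
-- ===== SOURCE A (Python) =====
-- def is_boring(substring):
--     return len(set(substring)) == 1
--
-- def find_longest_boring_substring(S):
--     N = len(S)
--     longest_boring_length = 0
--
--     # Iterate through all possible substrings
--     for i in range(N):
--         for j in range(i+1, N+1):
--             substring = S[i:j]
--
--             # Check if the substring is boring and occurs more than once
--             if is_boring(substring) and S.count(substring) > 1:
--                 longest_boring_length = max(longest_boring_length, len(substring))
--
--     return longest_boring_length
-- ===== SOURCE B (Python) =====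
-- def find_longest_boring_substring(S):
--     # Decompose S into maximal runs of equal characters; the answer is the best of
--     # run_length // 2 (two disjoint copies inside one run) and min(l1, l2) over two
--     # different runs of the same character.
--     runs = []
--     for ch in S:
--         if runs and runs[-1][0] == ch:
--             runs[-1] = (runs[-1][0], runs[-1][1] + 1)
--         else:
--             runs.append((ch, 1))
--     best = 0
--     seen = []
--     for run in runs:
--         c, l = run
--         best = max(best, l // 2)
--         for c2, l2 in seen:
--             if c2 == c:
--                 best = max(best, min(l, l2))
--         seen.append(run)
--     return best
-- ===== Notes on version B (the rewrite author's own statement) =====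
-- stated objective: faster
-- what changed: Replaces the all-substrings triple scan (every (i,j) substring, set() check and S.count) by a single run-length decomposition of S, taking the maximum of runlen//2 within a run and min of lengths over two runs of the same character.
import Mathlib
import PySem

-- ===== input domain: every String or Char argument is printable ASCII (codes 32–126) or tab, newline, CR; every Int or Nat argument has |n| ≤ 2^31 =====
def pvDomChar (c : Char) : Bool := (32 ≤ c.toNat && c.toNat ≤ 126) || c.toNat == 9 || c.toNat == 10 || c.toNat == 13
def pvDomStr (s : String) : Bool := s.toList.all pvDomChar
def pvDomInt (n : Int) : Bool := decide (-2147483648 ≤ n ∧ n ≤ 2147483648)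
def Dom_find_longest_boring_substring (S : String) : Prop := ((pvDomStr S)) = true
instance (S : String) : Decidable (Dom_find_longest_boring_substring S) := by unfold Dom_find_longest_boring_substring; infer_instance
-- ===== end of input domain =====

-- B replaces A's scan of all substrings (set() check plus S.count for each) by a single
-- run-length decomposition of S; objective: faster.

-- ===== PORT A =====
def pvIsBoring (substring : List Char) : Bool :=
  PySem.Set.len (PySem.Set.ofList substring) == 1

def find_longest_boring_substring (S : String) : Int :=
  let cs := S.toList
  let N : Int := (cs.length : Int)
  (PySem.List.pyRange 0 N 1).foldl (fun longest i =>
    (PySem.List.pyRange (i + 1) (N + 1) 1).foldl (fun longest j =>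
      let substring := PySem.List.slice cs (some i) (some j)
      if pvIsBoring substring && decide (1 < PySem.Chars.count cs substring) then
        max longest ((substring.length : Int))
      else longest) longest) 0

-- ===== PORT B =====
-- the runs[-1]-update / append step of Source B's first loop
def pvRunsStep (runs : List (Char × Int)) (ch : Char) : List (Char × Int) :=
  match runs.getLast? with
  | some (c, l) => if c == ch then runs.dropLast ++ [(c, l + 1)] else runs ++ [(ch, 1)]
  | none => runs ++ [(ch, 1)]

-- one iteration of Source B's second loop: state = (best, runs seen so far)
def pvBStep (st : Int × List (Char × Int)) (rl : Char × Int) : Int × List (Char × Int) :=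
  (st.2.foldl (fun b p => if p.1 == rl.1 then max b (min rl.2 p.2) else b)
      (max st.1 (PySem.Int.floordiv rl.2 2)),
   st.2 ++ [rl])

def find_longest_boring_substring_alt (S : String) : Int :=
  let runs := S.toList.foldl pvRunsStep []
  (runs.foldl pvBStep (0, [])).1

-- ===== PRECONDITION & SPEC =====
def Spec_find_longest_boring_substring (S : String) (out : Int) : Prop := out = find_longest_boring_substring_alt S
instance (S : String) (out : Int) : Decidable (Spec_find_longest_boring_substring S out) := by unfold Spec_find_longest_boring_substring; infer_instance

-- ===== CLAIM (what is proved, stated in full; the proofs are below) =====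
def Claim_equal_find_longest_boring_substring : Prop := ∀ (S : String), Dom_find_longest_boring_substring S → Spec_find_longest_boring_substring S (find_longest_boring_substring S)

-- ===== LEMMAS AND PROOFS =====

-- generic foldl-max lemmas --------------------------------------------------
theorem pvFoldMono {β : Type} (g : Int → β → Int) (h : ∀ a x, a ≤ g a x) :
    ∀ (l : List β) (a : Int), a ≤ l.foldl g a := by
  intro l
  induction l with
  | nil => intro a; simp
  | cons x t ih => intro a; exact le_trans (h a x) (ih (g a x))

theorem pvFoldAttain {β : Type} (g : Int → β → Int) (h : ∀ a x, a ≤ g a x)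
    {l : List β} {x : β} (hx : x ∈ l) {v : Int} (hv : ∀ b, v ≤ g b x) :
    ∀ a, v ≤ l.foldl g a := by
  induction l with
  | nil => cases hx
  | cons y t ih =>
    intro a
    rcases List.mem_cons.mp hx with rfl | hmem
    · exact le_trans (hv a) (pvFoldMono g h t (g a x))
    · exact ih hmem (g a y)

theorem pvFoldBound {β : Type} (g : Int → β → Int) {m : Int} :
    ∀ (l : List β) (a : Int), (∀ b x, x ∈ l → b ≤ m → g b x ≤ m) → a ≤ m →
      l.foldl g a ≤ m := by
  intro l
  induction l with
  | nil => intro a _ ha; simpa using ha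
  | cons x t ih =>
    intro a h ha
    exact ih (g a x) (fun b y hy hb => h b y (List.mem_cons_of_mem _ hy) hb)
      (h a x List.mem_cons_self ha)

-- run decomposition (proof-side, Nat lengths) -------------------------------
def runsN : List Char → List (Char × Nat)
  | [] => []
  | c :: t => (c, (t.takeWhile (· == c)).length + 1) :: runsN (t.dropWhile (· == c))
  termination_by l => l.length
  decreasing_by
    simp only [List.length_cons]
    exact Nat.lt_succ_of_le (List.length_dropWhile_le _ _)

theorem pvTakeWhile_beq (t : List Char) (c : Char) :
    t.takeWhile (· == c) = List.replicate (t.takeWhile (· == c)).length c := by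
  rw [List.eq_replicate_iff]
  refine ⟨rfl, fun b hb => ?_⟩
  have hbq := List.mem_takeWhile_imp hb
  exact eq_of_beq hbq

theorem runsN_flat : ∀ cs : List Char, (runsN cs).flatMap (fun p => List.replicate p.2 p.1) = cs := by
  intro cs
  induction cs using runsN.induct with
  | case1 => simp [runsN]
  | case2 c t ih =>
    rw [runsN]
    simp only [List.flatMap_cons, ih]
    rw [List.replicate_succ]
    simp only [List.cons_append, List.cons.injEq, true_and]
    conv_rhs => rw [← List.takeWhile_append_dropWhile (p := (· == c)) (l := t)]
    rw [← pvTakeWhile_beq]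

theorem runsN_pos : ∀ (cs : List Char) (p : Char × Nat), p ∈ runsN cs → 1 ≤ p.2 := by
  intro cs
  induction cs using runsN.induct with
  | case1 => intro p hp; simp [runsN] at hp
  | case2 c t ih =>
    intro p hp
    rw [runsN] at hp
    rcases List.mem_cons.mp hp with rfl | hmem
    · simp
    · exact ih p hmem

-- head of the tail after a run fails the run predicate
theorem pvHead?_dropWhile {p : Char → Bool} : ∀ (l : List Char) {x : Char},
    (l.dropWhile p).head? = some x → p x = false := by
  intro l
  induction l with
  | nil => intro x h; simp [List.dropWhile] at h
  | cons a t ih =>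
    intro x h
    rw [List.dropWhile_cons] at h
    by_cases hp : p a
    · rw [if_pos hp] at h; exact ih h
    · rw [if_neg hp] at h
      simp only [List.head?_cons, Option.some.injEq] at h
      rw [← h]
      exact Bool.eq_false_iff.mpr hp

-- the port-B first loop computes runsN (with Int lengths) -------------------
def pvToInt (rs : List (Char × Nat)) : List (Char × Int) := rs.map (fun p => (p.1, (p.2 : Int)))

theorem pvRunsFold_run (c : Char) : ∀ (l : Nat) (acc : List (Char × Int)) (m : Int),
    List.foldl pvRunsStep (acc ++ [(c, m)]) (List.replicate l c) = acc ++ [(c, m + l)] := by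
  intro l
  induction l with
  | zero => intro acc m; simp
  | succ n ih =>
    intro acc m
    rw [List.replicate_succ, List.foldl_cons]
    have hstep : pvRunsStep (acc ++ [(c, m)]) c = acc ++ [(c, m + 1)] := by
      unfold pvRunsStep
      rw [List.getLast?_concat]
      simp
    rw [hstep, ih acc (m + 1)]
    have : m + 1 + (n : Int) = m + ((n : Nat) + 1 : Nat) := by push_cast; ring
    rw [this]

theorem pvRunsFold_aux : ∀ (cs : List Char) (acc : List (Char × Int)),
    (∀ p, acc.getLast? = some p → ∀ x, cs.head? = some x → ¬ p.1 = x) →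
    List.foldl pvRunsStep acc cs = acc ++ pvToInt (runsN cs) := by
  intro cs
  induction cs using runsN.induct with
  | case1 => intro acc _; simp [runsN, pvToInt]
  | case2 c t ih =>
    intro acc hacc
    have hstep : pvRunsStep acc c = acc ++ [(c, 1)] := by
      cases hlast : acc.getLast? with
      | none => simp [pvRunsStep, hlast]
      | some p =>
        have hne : ¬ p.1 = c := hacc p hlast c rfl
        obtain ⟨pc, pl⟩ := p
        simp only at hne
        simp [pvRunsStep, hlast, beq_eq_false_iff_ne.mpr hne]
    rw [List.foldl_cons, hstep]
    conv_lhs => rw [← List.takeWhile_append_dropWhile (p := (· == c)) (l := t)]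
    rw [List.foldl_append]
    conv_lhs => rw [pvTakeWhile_beq t c]
    rw [pvRunsFold_run c (t.takeWhile (· == c)).length acc 1]
    rw [ih (acc ++ [(c, 1 + ((t.takeWhile (· == c)).length : Int))])
      (by
        intro p hp x hx
        rw [List.getLast?_concat] at hp
        obtain rfl : p = (c, 1 + ((t.takeWhile (· == c)).length : Int)) := by
          simpa using hp.symm
        have hfalse := pvHead?_dropWhile (p := (· == c)) t hx
        simp only [beq_eq_false_iff_ne, ne_eq] at hfalse
        simp only
        intro hcx
        exact hfalse hcx.symm)]
    rw [runsN]
    simp only [pvToInt, List.map_cons, List.append_assoc, List.singleton_append]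
    have : (1 + ((t.takeWhile (· == c)).length : Int)) = (((t.takeWhile (· == c)).length + 1 : Nat) : Int) := by
      push_cast; ring
    rw [this]

theorem pvRunsFold_eq : ∀ (cs : List Char), cs.foldl pvRunsStep [] = pvToInt (runsN cs) := by
  intro cs
  have := pvRunsFold_aux cs [] (by intro p hp; simp at hp)
  simpa using this

-- Python's non-overlapping count of c^k -------------------------------------
def pvCnt (sub l : List Char) : Nat := PySem.Chars.count.go sub l.length l 0

theorem pvGo_zero (sub l acc) : PySem.Chars.count.go sub 0 l acc = acc := by
  cases l <;> rfl

theorem pvGo_nil (sub f acc) : PySem.Chars.count.go sub f [] acc = acc := by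
  cases f <;> rfl

theorem pvGo_cons (sub : List Char) (f : Nat) (h : Char) (t : List Char) (acc : Nat) :
    PySem.Chars.count.go sub (f + 1) (h :: t) acc =
      if sub.isPrefixOf (h :: t) then
        PySem.Chars.count.go sub f ((h :: t).drop sub.length) (acc + 1)
      else PySem.Chars.count.go sub f t acc := rfl

theorem pvGo_fuel {sub : List Char} (hs : 1 ≤ sub.length) :
    ∀ (fuel : Nat) (l : List Char) (fuel' : Nat) (acc : Nat),
      l.length ≤ fuel → l.length ≤ fuel' →
      PySem.Chars.count.go sub fuel l acc = PySem.Chars.count.go sub fuel' l acc := by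
  intro fuel
  induction fuel with
  | zero =>
    intro l fuel' acc h1 _
    have hnil : l = [] := List.eq_nil_of_length_eq_zero (Nat.le_zero.mp h1)
    subst hnil
    rw [pvGo_zero, pvGo_nil]
  | succ f ihf =>
    intro l fuel' acc h1 h2
    cases l with
    | nil => rw [pvGo_nil, pvGo_nil]
    | cons a t =>
      simp only [List.length_cons] at h1 h2
      cases fuel' with
      | zero => omega
      | succ f' =>
        rw [pvGo_cons, pvGo_cons]
        by_cases hp : sub.isPrefixOf (a :: t)
        · rw [if_pos hp, if_pos hp]
          apply ihf <;> (simp only [List.length_drop, List.length_cons]; omega)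
        · rw [if_neg hp, if_neg hp]
          apply ihf <;> omega

theorem pvGo_acc (sub : List Char) :
    ∀ (fuel : Nat) (l : List Char) (acc : Nat),
      PySem.Chars.count.go sub fuel l acc = acc + PySem.Chars.count.go sub fuel l 0 := by
  intro fuel
  induction fuel with
  | zero => intro l acc; rw [pvGo_zero, pvGo_zero]; omega
  | succ f ihf =>
    intro l acc
    cases l with
    | nil => rw [pvGo_nil, pvGo_nil]; omega
    | cons a t =>
      rw [pvGo_cons, pvGo_cons]
      by_cases hp : sub.isPrefixOf (a :: t)
      · rw [if_pos hp, if_pos hp, ihf _ (acc + 1), ihf _ (0 + 1)]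
        omega
      · rw [if_neg hp, if_neg hp, ihf t acc]

theorem pvCount_eq_cnt (cs : List Char) (c : Char) {k : Nat} (hk : 1 ≤ k) :
    PySem.Chars.count cs (List.replicate k c) = pvCnt (List.replicate k c) cs := by
  unfold PySem.Chars.count pvCnt
  rw [if_neg]
  cases k with
  | zero => omega
  | succ n => simp [List.replicate_succ]

theorem pvPrefix_yes {c : Char} {k m : Nat} (hkm : k ≤ m) (rest : List Char) :
    (List.replicate k c).isPrefixOf (List.replicate m c ++ rest) = true := by
  rw [List.isPrefixOf_iff_prefix]
  have hrepl : List.replicate m c = List.replicate k c ++ List.replicate (m - k) c := by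
    rw [← List.replicate_add]
    congr 1
    omega
  rw [hrepl, List.append_assoc]
  exact List.prefix_append _ _

theorem pvPrefix_no {c : Char} {k m : Nat} (hkm : m < k) {rest : List Char}
    (hrest : ∀ x, rest.head? = some x → ¬ x = c) :
    ¬ (List.replicate k c).isPrefixOf (List.replicate m c ++ rest) = true := by
  rw [List.isPrefixOf_iff_prefix]
  intro hpre
  obtain ⟨t2, ht2⟩ := hpre
  have hk : List.replicate k c = List.replicate m c ++ List.replicate (k - m) c := by
    rw [← List.replicate_add]; congr 1; omega
  rw [hk, List.append_assoc] at ht2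
  have hrest2 : rest = List.replicate (k - m) c ++ t2 := List.append_cancel_left ht2.symm
  have hhead : rest.head? = some c := by
    rw [hrest2]
    cases hkm' : k - m with
    | zero => omega
    | succ n => simp [List.replicate_succ]
  exact hrest c hhead rfl

theorem pvGo_run {c : Char} {k : Nat} (hk : 1 ≤ k) :
    ∀ (m : Nat) (rest : List Char) (fuel : Nat),
      (∀ x, rest.head? = some x → ¬ x = c) →
      m + rest.length ≤ fuel →
      PySem.Chars.count.go (List.replicate k c) fuel (List.replicate m c ++ rest) 0
        = m / k + PySem.Chars.count.go (List.replicate k c) rest.length rest 0 := by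
  intro m
  induction m using Nat.strong_induction_on with
  | _ m ihm =>
    intro rest fuel hrest hfuel
    by_cases hkm : k ≤ m
    · -- a full copy of c^k is a prefix: count it, recurse on m - k
      cases m with
      | zero => omega
      | succ m' =>
        cases fuel with
        | zero => exact (by omega : False).elim
        | succ f =>
          have hcons : List.replicate (m' + 1) c ++ rest = c :: (List.replicate m' c ++ rest) := by
            rw [List.replicate_succ, List.cons_append]
          rw [hcons, pvGo_cons, ← hcons, if_pos (pvPrefix_yes hkm rest)]
          have hdrop : (List.replicate (m' + 1) c ++ rest).drop (List.replicate k c).length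
              = List.replicate (m' + 1 - k) c ++ rest := by
            have hsplit2 : List.replicate (m' + 1) c
                = List.replicate k c ++ List.replicate (m' + 1 - k) c := by
              rw [← List.replicate_add]; congr 1; omega
            rw [hsplit2, List.append_assoc]
            exact List.drop_left
          rw [hdrop, pvGo_acc]
          rw [ihm (m' + 1 - k) (by omega) rest f hrest (by omega)]
          have hdiv : (m' + 1) / k = (m' + 1 - k) / k + 1 := Nat.div_eq_sub_div (by omega) hkm
          omega
    · -- fewer than k leading c's: no match here, skip one character
      cases m with
      | zero =>
        simp only [List.replicate_zero, List.nil_append, Nat.zero_div, Nat.zero_add]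
        exact pvGo_fuel (by simpa using hk) fuel rest rest.length 0 (by omega) le_rfl
      | succ m' =>
        cases fuel with
        | zero => exact (by omega : False).elim
        | succ f =>
          have hcons : List.replicate (m' + 1) c ++ rest = c :: (List.replicate m' c ++ rest) := by
            rw [List.replicate_succ, List.cons_append]
          rw [hcons, pvGo_cons, ← hcons, if_neg (pvPrefix_no (by omega) hrest)]
          rw [ihm m' (by omega) rest f hrest (by omega)]
          have h1 : m' / k = 0 := Nat.div_eq_of_lt (by omega)
          have h2 : (m' + 1) / k = 0 := Nat.div_eq_of_lt (by omega)
          omega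

theorem pvCnt_run {c : Char} {k : Nat} (hk : 1 ≤ k) (m : Nat) (rest : List Char)
    (hrest : ∀ x, rest.head? = some x → ¬ x = c) :
    pvCnt (List.replicate k c) (List.replicate m c ++ rest) = m / k + pvCnt (List.replicate k c) rest := by
  unfold pvCnt
  exact pvGo_run hk m rest _ hrest (by simp)

theorem pvCnt_skipRun {d c : Char} (hne : ¬ d = c) {k : Nat} (hk : 1 ≤ k) :
    ∀ (m : Nat) (rest : List Char),
      pvCnt (List.replicate k c) (List.replicate m d ++ rest) = pvCnt (List.replicate k c) rest := by
  intro m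
  induction m with
  | zero => intro rest; simp
  | succ n ih =>
    intro rest
    have hcons : List.replicate (n + 1) d ++ rest = d :: (List.replicate n d ++ rest) := by
      rw [List.replicate_succ, List.cons_append]
    rw [hcons]
    show PySem.Chars.count.go _ ((List.replicate n d ++ rest).length + 1) _ 0 = _
    rw [pvGo_cons, if_neg]
    · exact ih rest
    · intro hp
      rw [List.isPrefixOf_iff_prefix] at hp
      obtain ⟨t2, ht2⟩ := hp
      cases k with
      | zero => omega
      | succ k' =>
        rw [List.replicate_succ, List.cons_append] at ht2
        simp only [List.cons.injEq] at ht2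
        exact hne ht2.1.symm

-- count over the run decomposition
theorem pvCnt_runs (cs : List Char) (c : Char) {k : Nat} (hk : 1 ≤ k) :
    pvCnt (List.replicate k c) cs
      = ((runsN cs).map (fun p => if p.1 = c then p.2 / k else 0)).sum := by
  induction cs using runsN.induct with
  | case1 => simp [runsN, pvCnt, pvGo_zero]
  | case2 d t ih =>
    rw [runsN]
    simp only [List.map_cons, List.sum_cons]
    have hdec : d :: t = List.replicate ((t.takeWhile (· == d)).length + 1) d ++ t.dropWhile (· == d) := by
      rw [List.replicate_succ, List.cons_append]
      congr 1
      conv_lhs => rw [← List.takeWhile_append_dropWhile (p := (· == d)) (l := t)]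
      rw [← pvTakeWhile_beq]
    have hrest : ∀ x, (t.dropWhile (· == d)).head? = some x → ¬ x = d := by
      intro x hx
      have := pvHead?_dropWhile (p := (· == d)) t hx
      simpa [beq_eq_false_iff_ne] using this
    by_cases hdc : d = c
    · subst hdc
      rw [hdec, pvCnt_run hk _ _ hrest, ih]
      simp
    · rw [hdec, pvCnt_skipRun hdc hk _ _, ih]
      simp [hdc]

-- sums of naturals ----------------------------------------------------------
theorem pvSumOne {α : Type} (g : α → Nat) : ∀ (l : List α), 1 ≤ (l.map g).sum →
    ∃ x ∈ l, 1 ≤ g x := by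
  intro l
  induction l with
  | nil => intro h; simp at h
  | cons x t ih =>
    intro h
    by_cases hx : 1 ≤ g x
    · exact ⟨x, List.mem_cons_self, hx⟩
    · have ht : 1 ≤ (t.map g).sum := by
        simp only [List.map_cons, List.sum_cons] at h
        omega
      obtain ⟨y, hy, hgy⟩ := ih ht
      exact ⟨y, List.mem_cons_of_mem _ hy, hgy⟩

theorem pvSumTwo {α : Type} (g : α → Nat) : ∀ (l : List α), 2 ≤ (l.map g).sum →
    (∃ x ∈ l, 2 ≤ g x) ∨ ∃ u x v y w, l = u ++ x :: v ++ y :: w ∧ 1 ≤ g x ∧ 1 ≤ g y := by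
  intro l
  induction l with
  | nil => intro h; simp at h
  | cons x t ih =>
    intro h
    simp only [List.map_cons, List.sum_cons] at h
    by_cases hx2 : 2 ≤ g x
    · exact Or.inl ⟨x, List.mem_cons_self, hx2⟩
    · by_cases hx1 : 1 ≤ g x
      · have ht : 1 ≤ (t.map g).sum := by omega
        obtain ⟨y, hy, hgy⟩ := pvSumOne g t ht
        obtain ⟨v, w, rfl⟩ := List.append_of_mem hy
        exact Or.inr ⟨[], x, v, y, w, rfl, hx1, hgy⟩
      · have ht : 2 ≤ (t.map g).sum := by omega
        rcases ih ht with ⟨y, hy, hgy⟩ | ⟨u, a, v, b, w, rfl, ha, hb⟩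
        · exact Or.inl ⟨y, List.mem_cons_of_mem _ hy, hgy⟩
        · exact Or.inr ⟨x :: u, a, v, b, w, rfl, ha, hb⟩

-- boring ↔ replicate --------------------------------------------------------
theorem pvBoring_replicate (sub : List Char) (h : pvIsBoring sub = true) :
    ∃ c, sub = List.replicate sub.length c ∧ 1 ≤ sub.length := by
  unfold pvIsBoring at h
  have hlen1 : PySem.Set.len (PySem.Set.ofList sub) = 1 := eq_of_beq h
  have hlen : (PySem.Set.ofList sub).length = 1 := by
    unfold PySem.Set.len at hlen1
    exact_mod_cast hlen1
  obtain ⟨c, hc⟩ := List.length_eq_one_iff.mp hlen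
  refine ⟨c, ?_, ?_⟩
  · rw [List.eq_replicate_iff]
    refine ⟨rfl, fun b hb => ?_⟩
    have hbmem : b ∈ PySem.Set.ofList sub := (PySem.Set.mem_ofList sub b).mpr hb
    rw [hc] at hbmem
    simpa using hbmem
  · have hcmem : c ∈ PySem.Set.ofList sub := by rw [hc]; simp
    have hmem : c ∈ sub := (PySem.Set.mem_ofList sub c).mp hcmem
    exact List.length_pos_of_mem hmem

theorem pvNodupSingleton {l : List Char} {c : Char} (hnd : l.Nodup)
    (hall : ∀ x ∈ l, x = c) (hc : c ∈ l) : l = [c] := by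
  cases l with
  | nil => cases hc
  | cons a t =>
    have ha : a = c := hall a List.mem_cons_self
    subst ha
    have ht : t = [] := by
      cases t with
      | nil => rfl
      | cons b u =>
        have hb : b = a := hall b (by simp)
        subst hb
        simp at hnd
    rw [ht]

theorem pvReplicate_boring (c : Char) {k : Nat} (hk : 1 ≤ k) :
    pvIsBoring (List.replicate k c) = true := by
  unfold pvIsBoring
  have h1 : PySem.Set.ofList (List.replicate k c) = [c] := by
    apply pvNodupSingleton (PySem.Set.nodup_ofList _)
    · intro x hx
      exact List.eq_of_mem_replicate ((PySem.Set.mem_ofList _ x).mp hx)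
    · exact (PySem.Set.mem_ofList _ c).mpr (List.mem_replicate.mpr ⟨by omega, rfl⟩)
  rw [h1]
  rfl

-- run membership gives an occurrence ----------------------------------------
theorem pvRun_infix {cs : List Char} {c : Char} {l k : Nat} (hmem : (c, l) ∈ runsN cs)
    (hk : k ≤ l) : List.replicate k c <:+: cs := by
  obtain ⟨u, v, huv⟩ := List.append_of_mem hmem
  have hflat := runsN_flat cs
  rw [huv] at hflat
  simp only [List.flatMap_append, List.flatMap_cons] at hflat
  have hrep : List.replicate l c = List.replicate k c ++ List.replicate (l - k) c := by
    rw [← List.replicate_add]; congr 1; omega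
  refine ⟨u.flatMap (fun p => List.replicate p.2 p.1),
    List.replicate (l - k) c ++ v.flatMap (fun p => List.replicate p.2 p.1), ?_⟩
  rw [← hflat, hrep]
  simp only [List.append_assoc]

-- B-side fold facts ----------------------------------------------------------
theorem pvBStepMono (st : Int × List (Char × Int)) (rl : Char × Int) :
    st.1 ≤ (pvBStep st rl).1 := by
  unfold pvBStep
  calc st.1 ≤ max st.1 (PySem.Int.floordiv rl.2 2) := le_max_left _ _
    _ ≤ _ := pvFoldMono _ (fun a p => by split <;> simp) st.2 _

theorem pvBSeen : ∀ (rs : List (Char × Int)) (st : Int × List (Char × Int)),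
    (rs.foldl pvBStep st).2 = st.2 ++ rs := by
  intro rs
  induction rs with
  | nil => intro st; simp
  | cons rl t ih =>
    intro st
    rw [List.foldl_cons, ih]
    simp [pvBStep]

theorem pvBMono : ∀ (rs : List (Char × Int)) (st : Int × List (Char × Int)),
    st.1 ≤ (rs.foldl pvBStep st).1 := by
  intro rs
  induction rs with
  | nil => intro st; simp
  | cons rl t ih =>
    intro st
    exact le_trans (pvBStepMono st rl) (ih (pvBStep st rl))

theorem pvBAtt1 {rs : List (Char × Int)} {c : Char} {l : Int} (h : (c, l) ∈ rs) :
    ∀ st, PySem.Int.floordiv l 2 ≤ (rs.foldl pvBStep st).1 := by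
  intro st
  obtain ⟨u, v, rfl⟩ := List.append_of_mem h
  rw [List.foldl_append, List.foldl_cons]
  refine le_trans ?_ (pvBMono v _)
  show PySem.Int.floordiv l 2 ≤ (pvBStep _ (c, l)).1
  unfold pvBStep
  dsimp only
  calc PySem.Int.floordiv l 2
      ≤ max ((u.foldl pvBStep st).1) (PySem.Int.floordiv l 2) := le_max_right _ _
    _ ≤ _ := pvFoldMono _ (fun a p => by split <;> simp) _ _

theorem pvBAtt2 {c : Char} {l l2 : Int} : ∀ (rs : List (Char × Int)), (c, l) ∈ rs →
    ∀ st, (c, l2) ∈ st.2 → min l l2 ≤ (rs.foldl pvBStep st).1 := by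
  intro rs h st hst
  obtain ⟨u, v, rfl⟩ := List.append_of_mem h
  rw [List.foldl_append, List.foldl_cons]
  refine le_trans ?_ (pvBMono v _)
  have hmem : (c, l2) ∈ (u.foldl pvBStep st).2 := by
    rw [pvBSeen]
    exact List.mem_append_left _ hst
  show min l l2 ≤ (pvBStep _ (c, l)).1
  unfold pvBStep
  refine pvFoldAttain _ (fun a p => by split <;> simp) hmem ?_ _
  intro b
  simp only
  rw [if_pos (by simp)]
  exact le_max_right _ _

theorem pvBAtt3 {c : Char} {l l2 : Int} {u v : List (Char × Int)} (h : (c, l) ∈ v) :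
    ∀ st, min l l2 ≤ ((u ++ (c, l2) :: v).foldl pvBStep st).1 := by
  intro st
  have hsplit : u ++ (c, l2) :: v = (u ++ [(c, l2)]) ++ v := by simp
  rw [hsplit, List.foldl_append]
  apply pvBAtt2 v h
  rw [pvBSeen]
  simp

theorem pvBBound {m : Int} : ∀ (rs : List (Char × Int)) (st : Int × List (Char × Int)),
    st.1 ≤ m →
    (∀ c l, (c, l) ∈ rs → PySem.Int.floordiv l 2 ≤ m) →
    (∀ c l l2, (c, l2) ∈ st.2 → (c, l) ∈ rs → min l l2 ≤ m) →
    (∀ c l l2 u v, rs = u ++ (c, l2) :: v → (c, l) ∈ v → min l l2 ≤ m) →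
    (rs.foldl pvBStep st).1 ≤ m := by
  intro rs
  induction rs with
  | nil => intro st h1 _ _ _; simpa using h1
  | cons rl t ih =>
    intro st h1 h2 h3 h4
    rw [List.foldl_cons]
    apply ih (pvBStep st rl)
    · unfold pvBStep
      apply pvFoldBound
      · intro b p hp hb
        dsimp only
        by_cases hpc : (p.1 == rl.1) = true
        · rw [if_pos hpc]
          have hpeq : p.1 = rl.1 := eq_of_beq hpc
          have hmin := h3 rl.1 rl.2 p.2 (by rw [← hpeq]; simpa using hp) (by simp)
          exact max_le hb hmin
        · rw [if_neg hpc]; exact hb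
      · exact max_le h1 (h2 rl.1 rl.2 (by simp))
    · intro c l hl
      exact h2 c l (List.mem_cons_of_mem _ hl)
    · intro c l l2 hst hl
      unfold pvBStep at hst
      simp only at hst
      rcases List.mem_append.mp hst with hold | hnew
      · exact h3 c l l2 hold (List.mem_cons_of_mem _ hl)
      · have hrl : rl = (c, l2) := by
          have := hnew
          simp only [List.mem_singleton] at this
          exact this.symm
        exact h4 c l l2 [] t (by rw [hrl]; simp) hl
    · intro c l l2 u v hteq hl
      exact h4 c l l2 (rl :: u) v (by rw [hteq]; simp) hl

-- A-side: the nested fold is monotone and attains every valid candidate ------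
theorem pvAInnerMono (cs : List Char) (N i : Int) :
    ∀ a, a ≤ (PySem.List.pyRange (i + 1) (N + 1) 1).foldl (fun longest j =>
      let substring := PySem.List.slice cs (some i) (some j)
      if pvIsBoring substring && decide (1 < PySem.Chars.count cs substring) then
        max longest ((substring.length : Int))
      else longest) a := by
  intro a
  apply pvFoldMono
  intro b j
  dsimp only
  split <;> simp

theorem pvANonneg (S : String) : 0 ≤ find_longest_boring_substring S := by
  simp only [find_longest_boring_substring]
  apply pvFoldMono
  intro a i
  exact pvAInnerMono _ _ i a

theorem pvAAttain (S : String) {c : Char} {k : Nat} (hk : 1 ≤ k)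
    (hinf : List.replicate k c <:+: S.toList)
    (hcnt : 2 ≤ PySem.Chars.count S.toList (List.replicate k c)) :
    (k : Int) ≤ find_longest_boring_substring S := by
  obtain ⟨s, t2, hst⟩ := hinf
  have hlen : s.length + k ≤ S.toList.length := by
    rw [← hst]
    simp only [List.length_append, List.length_replicate]
    omega
  have hslice : PySem.List.slice S.toList (some (s.length : Int)) (some ((s.length : Int) + (k : Int)))
      = List.replicate k c := by
    rw [PySem.List.slice_natCast_add]
    rw [← hst, List.append_assoc, List.drop_left]
    exact List.take_left' (by simp)
  simp only [find_longest_boring_substring]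
  apply pvFoldAttain _ (fun a i => pvAInnerMono S.toList _ i a)
    (x := (s.length : Int))
    (by
      rw [PySem.List.mem_pyRange_one]
      constructor
      · positivity
      · omega)
  intro b
  apply pvFoldAttain _ (fun a j => by dsimp only; split <;> simp)
    (x := (s.length : Int) + (k : Int))
    (by
      rw [PySem.List.mem_pyRange_one]
      constructor
      · omega
      · omega)
  intro b2
  dsimp only
  rw [hslice, if_pos]
  · simp
  · rw [pvReplicate_boring c hk]
    simp only [Bool.true_and, decide_eq_true_eq]
    omega

-- A ≤ B ----------------------------------------------------------------------
theorem pvA_le_B (S : String) :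
    find_longest_boring_substring S ≤ find_longest_boring_substring_alt S := by
  have hBeq : find_longest_boring_substring_alt S
      = ((pvToInt (runsN S.toList)).foldl pvBStep (0, [])).1 := by
    simp only [find_longest_boring_substring_alt]
    rw [pvRunsFold_eq]
  have hm0 : (0 : Int) ≤ find_longest_boring_substring_alt S := by
    rw [hBeq]
    exact pvBMono _ _
  simp only [find_longest_boring_substring]
  apply pvFoldBound
  · intro b i _ hb
    apply pvFoldBound
    · intro b2 j _ hb2
      dsimp only
      split
      next hcond =>
        simp only [Bool.and_eq_true, decide_eq_true_eq] at hcond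
        obtain ⟨hbor, hcnt'⟩ := hcond
        obtain ⟨c, hrep, hpos⟩ := pvBoring_replicate _ hbor
        apply max_le hb2
        have hk0 : 0 < (PySem.List.slice S.toList (some i) (some j)).length := hpos
        have hcnt2 : 2 ≤ pvCnt (List.replicate (PySem.List.slice S.toList (some i) (some j)).length c) S.toList := by
          rw [← pvCount_eq_cnt S.toList c hpos, ← hrep]
          omega
        rw [pvCnt_runs S.toList c hpos] at hcnt2
        rw [hBeq]
        rcases pvSumTwo _ _ hcnt2 with ⟨p, hmem, hge2⟩ | ⟨u, x, v, y, w, hdec, hx, hy⟩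
        · obtain ⟨c', ln⟩ := p
          by_cases hcc : c' = c
          · subst hcc
            simp only [if_true] at hge2
            have h2k : 2 * (PySem.List.slice S.toList (some i) (some j)).length ≤ ln :=
              (Nat.le_div_iff_mul_le hk0).mp hge2
            have hmem' : (c', (ln : Int)) ∈ pvToInt (runsN S.toList) :=
              List.mem_map.mpr ⟨(c', ln), hmem, rfl⟩
            have hflo : PySem.Int.floordiv (ln : Int) 2 = ((ln / 2 : Nat) : Int) := by
              exact_mod_cast PySem.Int.floordiv_natCast ln 2
            refine le_trans ?_ (hflo ▸ pvBAtt1 hmem' (0, []))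
            have : (PySem.List.slice S.toList (some i) (some j)).length ≤ ln / 2 := by omega
            exact_mod_cast this
          · simp only [if_neg hcc] at hge2
            omega
        · obtain ⟨cx, lx⟩ := x
          obtain ⟨cy, ly⟩ := y
          by_cases hcx : cx = c
          swap
          · simp only [if_neg hcx] at hx; omega
          by_cases hcy : cy = c
          swap
          · simp only [if_neg hcy] at hy; omega
          rw [hcx] at hdec
          rw [hcy] at hdec
          rw [if_pos hcx] at hx
          rw [if_pos hcy] at hy
          have hklx : (PySem.List.slice S.toList (some i) (some j)).length ≤ lx := by
            have := (Nat.le_div_iff_mul_le hk0).mp hx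
            omega
          have hkly : (PySem.List.slice S.toList (some i) (some j)).length ≤ ly := by
            have := (Nat.le_div_iff_mul_le hk0).mp hy
            omega
          have hmap : pvToInt (runsN S.toList)
              = pvToInt u ++ (c, (lx : Int)) :: (pvToInt v ++ (c, (ly : Int)) :: pvToInt w) := by
            rw [hdec]
            simp [pvToInt]
          rw [hmap]
          refine le_trans ?_ (pvBAtt3 (l := (ly : Int)) (l2 := (lx : Int))
            (List.mem_append_right _ List.mem_cons_self) (0, []))
          rw [le_min_iff]
          constructor
          · exact_mod_cast hkly
          · exact_mod_cast hklx
      next => exact hb2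
    · exact hb
  · exact hm0

-- B ≤ A ----------------------------------------------------------------------
theorem pvB_le_A (S : String) :
    find_longest_boring_substring_alt S ≤ find_longest_boring_substring S := by
  have hBeq : find_longest_boring_substring_alt S
      = ((pvToInt (runsN S.toList)).foldl pvBStep (0, [])).1 := by
    simp only [find_longest_boring_substring_alt]
    rw [pvRunsFold_eq]
  rw [hBeq]
  apply pvBBound
  · exact pvANonneg S
  · intro c l hl
    obtain ⟨p, hp, hpe⟩ := List.mem_map.mp hl
    obtain ⟨c0, ln⟩ := p
    simp only [Prod.mk.injEq] at hpe
    obtain ⟨rfl, hln⟩ := hpe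
    subst hln
    have hflo : PySem.Int.floordiv (ln : Int) 2 = ((ln / 2 : Nat) : Int) := by
      exact_mod_cast PySem.Int.floordiv_natCast ln 2
    rw [hflo]
    by_cases h0 : ln / 2 = 0
    · rw [h0]
      simpa using pvANonneg S
    · have hk1 : 1 ≤ ln / 2 := by omega
      apply pvAAttain S hk1 (pvRun_infix hp (Nat.div_le_self ln 2))
      rw [pvCount_eq_cnt _ _ hk1, pvCnt_runs _ _ hk1]
      obtain ⟨u, v, huv⟩ := List.append_of_mem hp
      rw [huv]
      simp only [List.map_append, List.map_cons, List.sum_append, List.sum_cons, if_true]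
      have h2 : 2 ≤ ln / (ln / 2) := (Nat.le_div_iff_mul_le hk1).mpr (by omega)
      omega
  · intro c l l2 hst _
    exact absurd hst (by simp)
  · intro c l l2 u v hdec hl
    unfold pvToInt at hdec
    rw [List.map_eq_append_iff] at hdec
    obtain ⟨u0, r0, hsplit, hu, hr⟩ := hdec
    cases r0 with
    | nil => simp at hr
    | cons p r1 =>
      simp only [List.map_cons, List.cons.injEq] at hr
      obtain ⟨hp1, hr1⟩ := hr
      obtain ⟨c0, ln2⟩ := p
      simp only [Prod.mk.injEq] at hp1
      obtain ⟨rfl, hl2⟩ := hp1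
      obtain ⟨q, hq, hqe⟩ := List.mem_map.mp (hr1 ▸ hl)
      obtain ⟨c1, ln1⟩ := q
      simp only [Prod.mk.injEq] at hqe
      obtain ⟨rfl, hl1⟩ := hqe
      have hmem2 : (c1, ln2) ∈ runsN S.toList := by
        rw [hsplit]
        exact List.mem_append_right _ List.mem_cons_self
      have hmem1 : (c1, ln1) ∈ runsN S.toList := by
        rw [hsplit]
        exact List.mem_append_right _ (List.mem_cons_of_mem _ hq)
      have hp1' := runsN_pos _ _ hmem1
      have hp2' := runsN_pos _ _ hmem2
      have hk1 : 1 ≤ min ln1 ln2 := by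
        simp only at hp1' hp2'
        omega
      have hminc : min l l2 = ((min ln1 ln2 : Nat) : Int) := by
        rw [← hl1, ← hl2]
        exact_mod_cast (Nat.cast_min (m := ln1) (n := ln2)).symm
      rw [hminc]
      apply pvAAttain S hk1 (pvRun_infix hmem1 (min_le_left _ _))
      rw [pvCount_eq_cnt _ _ hk1, pvCnt_runs _ _ hk1]
      rw [hsplit]
      obtain ⟨a, b2, hab⟩ := List.append_of_mem hq
      rw [hab]
      simp only [List.map_append, List.map_cons, List.sum_append, List.sum_cons, if_true]
      have e1 : 1 ≤ ln2 / min ln1 ln2 := (Nat.le_div_iff_mul_le hk1).mpr (by omega)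
      have e2 : 1 ≤ ln1 / min ln1 ln2 := (Nat.le_div_iff_mul_le hk1).mpr (by omega)
      omega

-- ===== VERDICT (by name: the statement is the Claim_ definition above) =====
theorem find_longest_boring_substring_spec : Claim_equal_find_longest_boring_substring := by
  intro S _
  unfold Spec_find_longest_boring_substring
  exact le_antisymm (pvA_le_B S) (pvB_le_A S)
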